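-- pv_equiv track=rewrite | github.com/tcztzy/riff_diff_protflow | structure_generation.py | generate_variants
-- ===== SOURCE A (Python) =====
-- import copy
-- import itertools
--
-- def generate_variants(mutation_dict, seq):
--     mutlist = []
--     poslist = []
--     for pos in mutation_dict:
--         poslist.append(pos)
--         mutlist.append(mutation_dict[pos])
--     combs = list(itertools.product(*mutlist))
--     variants = []
--     for comb in combs:
--         var = copy.deepcopy(seq)
--         for index, AA in enumerate(comb):
--             var[int(poslist[index]) - 1] = AA
--         variants.append(''.join(var))
--     return variants
-- ===== SOURCE B (Python) =====
-- def generate_variants(mutation_dict, seq):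
--     # Mixed-radix "odometer" enumeration: variant #i is decoded directly from the
--     # integer i via positional weights (suffix products of the option counts),
--     # with the first position most significant -- no product list is materialized.
--     items = list(mutation_dict.items())
--     weights = []
--     total = 1
--     for _, aas in reversed(items):
--         weights.append(total)
--         total *= len(aas)
--     weights.reverse()
--     variants = []
--     for i in range(total):
--         var = list(seq)
--         for (pos, aas), w in zip(items, weights):
--             var[int(pos) - 1] = aas[(i // w) % len(aas)]
--         variants.append(''.join(var))
--     return variants
-- ===== Notes on version B (the rewrite author's own statement) =====
-- stated objective: alternative
-- what changed: Replaces itertools.product materialization plus per-combination deepcopy-and-substitute with mixed-radix (odometer) enumeration: positional weights (suffix products of option counts) are precomputed and variant #i is decoded arithmetically from the integer i, so no combination tuples are ever built.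
import Mathlib
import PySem

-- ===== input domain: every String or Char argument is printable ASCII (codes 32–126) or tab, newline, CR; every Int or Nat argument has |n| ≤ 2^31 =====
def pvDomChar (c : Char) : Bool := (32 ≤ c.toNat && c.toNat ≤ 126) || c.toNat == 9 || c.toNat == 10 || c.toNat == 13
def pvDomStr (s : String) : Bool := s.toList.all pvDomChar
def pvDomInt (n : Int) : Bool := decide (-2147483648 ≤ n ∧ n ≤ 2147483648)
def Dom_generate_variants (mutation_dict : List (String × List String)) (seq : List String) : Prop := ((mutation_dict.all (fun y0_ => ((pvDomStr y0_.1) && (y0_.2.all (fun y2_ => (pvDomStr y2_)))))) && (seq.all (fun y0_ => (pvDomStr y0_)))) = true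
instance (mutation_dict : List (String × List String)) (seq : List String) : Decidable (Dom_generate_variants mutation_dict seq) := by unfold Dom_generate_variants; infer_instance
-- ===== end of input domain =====

-- B replaces A's itertools.product materialization + per-combination substitution by a
-- mixed-radix (odometer) decode of each variant index against precomputed positional weights
-- (alternative algorithm, same cost class).


-- ===== PORT A =====
-- itertools.product(*lists) as a list of lists (leftmost factor slowest-varying, like Python)
def pvProduct {α : Type} : List (List α) → List (List α)
  | [] => [[]]
  | l :: ls => l.flatMap (fun x => (pvProduct ls).map (fun c => x :: c))

def generate_variants (mutation_dict : List (String × List String)) (seq : List String) : List String :=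
  let d := PySem.Dict.ofList mutation_dict
  -- for pos in mutation_dict: poslist.append(pos); mutlist.append(mutation_dict[pos])
  let pl := d.items.foldl
    (fun (acc : List String × List (List String)) kv => (acc.1 ++ [kv.1], acc.2 ++ [kv.2])) ([], [])
  let poslist := pl.1
  let mutlist := pl.2
  let combs := pvProduct mutlist
  combs.foldl (fun variants comb =>
    let var := (PySem.List.enumerate comb).foldl
      (fun var p =>
        PySem.List.pySetD var ((PySem.Int.ofStr? (PySem.List.pyGetD poslist p.1 "")).getD 0 - 1) p.2)
      seq
    variants ++ [PySem.Str.join "" var]) []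

-- ===== PORT B =====
def generate_variants_alt (mutation_dict : List (String × List String)) (seq : List String) : List String :=
  let items := (PySem.Dict.ofList mutation_dict).items
  -- for _, aas in reversed(items): weights.append(total); total *= len(aas)
  let wt := items.reverse.foldl
    (fun (acc : List Int × Int) kv => (acc.1 ++ [acc.2], acc.2 * (kv.2.length : Int))) ([], 1)
  let weights := wt.1.reverse
  let total := wt.2
  (PySem.List.pyRange 0 total 1).foldl (fun variants i =>
    let var := (items.zip weights).foldl
      (fun var q =>
        PySem.List.pySetD var ((PySem.Int.ofStr? q.1.1).getD 0 - 1)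
          (PySem.List.pyGetD q.1.2
            (PySem.Int.mod (PySem.Int.floordiv i q.2) (q.1.2.length : Int)) ""))
      seq
    variants ++ [PySem.Str.join "" var]) []

-- ===== PRECONDITION & SPEC =====
-- Pre_ excludes exactly the inputs where the Python A raises: when every mutation list is
-- nonempty (so at least one combination is built), every dict key must parse as an int whose
-- 1-based position indexes seq (Python negative indexing allowed); otherwise int() raises
-- ValueError or the assignment raises IndexError.
def Pre_generate_variants (mutation_dict : List (String × List String)) (seq : List String) : Prop :=
  ((PySem.Dict.ofList mutation_dict).items.all (fun kv => !kv.2.isEmpty) = true) →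
  ((PySem.Dict.ofList mutation_dict).items.all (fun kv =>
      match PySem.Int.ofStr? kv.1 with
      | some n => decide (PySem.Raise.InRange seq.length (n - 1))
      | none => false) = true)
instance (mutation_dict : List (String × List String)) (seq : List String) : Decidable (Pre_generate_variants mutation_dict seq) := by unfold Pre_generate_variants; infer_instance

def pvWitness_generate_variants : (List (String × List String)) × List String :=
  ([("1", ["A", "B"]), ("3", ["C"])], ["M", "N", "P"])

def Spec_generate_variants (mutation_dict : List (String × List String)) (seq : List String) (out : List String) : Prop := out = generate_variants_alt mutation_dict seq
instance (mutation_dict : List (String × List String)) (seq : List String) (out : List String) : Decidable (Spec_generate_variants mutation_dict seq out) := by unfold Spec_generate_variants; infer_instance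

-- ===== CLAIM (what is proved, stated in full; the proofs are below) =====
def Claim_equal_generate_variants : Prop := ∀ (mutation_dict : List (String × List String)) (seq : List String), Dom_generate_variants mutation_dict seq → Pre_generate_variants mutation_dict seq → Spec_generate_variants mutation_dict seq (generate_variants mutation_dict seq)

-- ===== LEMMAS AND PROOFS =====

-- the parsed 0-based index of a dict key (shared expression of both ports)
def pvIdx (k : String) : Int := (PySem.Int.ofStr? k).getD 0 - 1

-- apply a list of (key, residue) assignments in order
def pvApply (qs : List (String × String)) (base : List String) : List String :=
  qs.foldl (fun v q => PySem.List.pySetD v (pvIdx q.1) q.2) base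

-- product of the option counts (the number of combinations)
def pvTot (ls : List (List String)) : Int :=
  ls.foldr (fun l t => (l.length : Int) * t) 1

-- mixed-radix decode of index i against lists ls (first list most significant)
def pvDec (ls : List (List String)) (i : Int) : List String :=
  match ls with
  | [] => []
  | l :: ls =>
      PySem.List.pyGetD l (PySem.Int.mod (PySem.Int.floordiv i (pvTot ls)) (l.length : Int)) ""
        :: pvDec ls i

-- the weight list B computes: suffix products of the option counts
def pvW : List (String × List String) → List Int
  | [] => []
  | _ :: rs => pvTot (rs.map (·.2)) :: pvW rs

-- running prefix products starting at t (what B's reversed fold builds)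
def pvP (t : Int) : List (String × List String) → List Int
  | [] => []
  | kv :: rs => t :: pvP (t * (kv.2.length : Int)) rs

theorem pvProduct_nil_mem {α : Type} (ls : List (List α)) (h : [] ∈ ls) : pvProduct ls = [] := by
  induction ls with
  | nil => simp at h
  | cons l ls ih =>
    rcases List.mem_cons.mp h with rfl | hmem
    · simp [pvProduct]
    · simp [pvProduct, ih hmem]

theorem pv_pairs_foldl (ps : List (String × List String)) (a : List String) (b : List (List String)) :
    ps.foldl (fun (acc : List String × List (List String)) kv => (acc.1 ++ [kv.1], acc.2 ++ [kv.2])) (a, b)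
      = (a ++ ps.map (·.1), b ++ ps.map (·.2)) := by
  induction ps generalizing a b with
  | nil => simp
  | cons kv ps ih => simp [List.foldl_cons, ih]

-- the enumerate-indexed assignment loop of A equals pvApply on the zipped tail
theorem pv_enum_apply (poslist : List String) :
    ∀ (comb : List String) (s : Nat) (base : List String), s + comb.length ≤ poslist.length →
    (PySem.List.enumerate comb (s : Int)).foldl
        (fun var p => PySem.List.pySetD var ((PySem.Int.ofStr? (PySem.List.pyGetD poslist p.1 "")).getD 0 - 1) p.2) base
      = pvApply ((poslist.drop s).zip comb) base := by
  intro comb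
  induction comb with
  | nil => intro s base _; simp [PySem.List.enumerate_nil, pvApply]
  | cons x c ih =>
    intro s base h
    have hs : s < poslist.length := by simp at h; omega
    have hget : PySem.List.pyGetD poslist (s : Int) "" = poslist[s] := by
      rw [PySem.List.pyGetD_natCast]; exact List.getD_eq_getElem poslist "" hs
    have hdrop : poslist.drop s = poslist[s] :: poslist.drop (s + 1) :=
      List.drop_eq_getElem_cons hs
    have hcast : ((s : Int) + 1) = ((s + 1 : Nat) : Int) := by push_cast; ring
    rw [PySem.List.enumerate_cons, List.foldl_cons, hget, hcast,
      ih (s + 1) _ (by simp at h ⊢; omega), hdrop, List.zip_cons_cons]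
    simp only [pvApply, pvIdx, List.foldl_cons]

-- ---- weights ----

theorem pv_wfold (rs : List (String × List String)) (a : List Int) (t : Int) :
    rs.foldl (fun (acc : List Int × Int) kv => (acc.1 ++ [acc.2], acc.2 * (kv.2.length : Int))) (a, t)
      = (a ++ pvP t rs, t * pvTot (rs.map (·.2))) := by
  induction rs generalizing a t with
  | nil => simp [pvP, pvTot]
  | cons kv rs ih =>
    simp [List.foldl_cons, ih, pvP, pvTot, mul_assoc]

theorem pvTot_append_singleton (xs : List (List String)) (y : List String) :
    pvTot (xs ++ [y]) = pvTot xs * (y.length : Int) := by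
  induction xs with
  | nil => simp [pvTot]
  | cons x xs ih => simp only [List.cons_append, pvTot, List.foldr_cons] at *; rw [ih]; ring

theorem pvTot_reverse (xs : List (List String)) : pvTot xs.reverse = pvTot xs := by
  induction xs with
  | nil => rfl
  | cons x xs ih =>
    rw [List.reverse_cons, pvTot_append_singleton, ih]
    simp only [pvTot, List.foldr_cons]
    ring

theorem pvP_append (t : Int) (xs : List (String × List String)) (y : String × List String) :
    pvP t (xs ++ [y]) = pvP t xs ++ [t * pvTot (xs.map (·.2))] := by
  induction xs generalizing t with
  | nil => simp [pvP, pvTot]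
  | cons x xs ih =>
    simp only [List.cons_append, pvP, ih, pvTot, List.map_cons, List.foldr_cons]
    rw [mul_assoc]

theorem pvP_reverse (ps : List (String × List String)) :
    (pvP 1 ps.reverse).reverse = pvW ps := by
  induction ps with
  | nil => rfl
  | cons kv ps ih =>
    rw [List.reverse_cons, pvP_append, List.reverse_append]
    simp only [List.reverse_cons, List.reverse_nil, List.nil_append, List.singleton_append,
      List.map_reverse, pvW]
    rw [ih]
    congr 1
    rw [← pvTot_reverse (ps.map (·.2))]
    ring

-- ---- positivity / zero ----

theorem pvTot_pos (ls : List (List String)) (h : ∀ l ∈ ls, l ≠ []) : 0 < pvTot ls := by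
  induction ls with
  | nil => norm_num [pvTot]
  | cons l ls ih =>
    have hl : l ≠ [] := h l (by simp)
    have : 0 < (l.length : Int) := by
      have := List.length_pos_iff.mpr hl; omega
    have ht := ih (fun x hx => h x (by simp [hx]))
    simp only [pvTot, List.foldr_cons] at *
    positivity

theorem pvTot_zero_of_mem (ls : List (List String)) (h : [] ∈ ls) : pvTot ls = 0 := by
  induction ls with
  | nil => simp at h
  | cons l ls ih =>
    rcases List.mem_cons.mp h with rfl | hmem
    · simp [pvTot]
    · simp only [pvTot, List.foldr_cons] at *
      rw [ih hmem]; ring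

-- ---- decode ----

theorem pvDec_period (ls : List (List String)) (h : ∀ l ∈ ls, l ≠ []) (i c : Int) :
    pvDec ls (i + c * pvTot ls) = pvDec ls i := by
  induction ls generalizing c with
  | nil => rfl
  | cons l ls ih =>
    have hT : 0 < pvTot ls := pvTot_pos ls (fun x hx => h x (by simp [hx]))
    have hl : 0 < (l.length : Int) := by
      have := List.length_pos_iff.mpr (h l (by simp)); omega
    have htot : pvTot (l :: ls) = (l.length : Int) * pvTot ls := rfl
    simp only [pvDec, htot]
    rw [List.cons.injEq]
    constructor
    · congr 1
      rw [PySem.Int.floordiv_eq_ediv_of_pos hT, PySem.Int.floordiv_eq_ediv_of_pos hT,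
        PySem.Int.mod_eq_emod_of_pos hl, PySem.Int.mod_eq_emod_of_pos hl]
      have : i + c * ((l.length : Int) * pvTot ls) = i + (c * (l.length : Int)) * pvTot ls := by ring
      rw [this, Int.add_mul_ediv_right _ _ (by omega : pvTot ls ≠ 0)]
      have : i / pvTot ls + c * (l.length : Int) = i / pvTot ls + (l.length : Int) * c := by ring
      rw [this, Int.add_mul_emod_self_left]
    · have : i + c * ((l.length : Int) * pvTot ls) = i + (c * (l.length : Int)) * pvTot ls := by ring
      rw [this, ih (fun x hx => h x (by simp [hx]))]

theorem pv_nat_range_mul (a b : Nat) :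
    List.range (a * b) = (List.range a).flatMap (fun q => (List.range b).map (fun r => q * b + r)) := by
  induction a with
  | zero => simp
  | succ a ih =>
    rw [Nat.succ_mul, List.range_add, ih, List.range_succ, List.flatMap_append]
    simp

theorem pv_pyRange_mul (a b : Int) (ha : 0 ≤ a) (hb : 0 ≤ b) :
    PySem.List.pyRange 0 (a * b) 1
      = (PySem.List.pyRange 0 a 1).flatMap
          (fun q => (PySem.List.pyRange 0 b 1).map (fun r => q * b + r)) := by
  rw [PySem.List.pyRange_one, PySem.List.pyRange_one, PySem.List.pyRange_one]
  have hab : (a * b - 0).toNat = (a - 0).toNat * (b - 0).toNat := by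
    simp only [Int.sub_zero]
    exact Int.toNat_mul ha hb
  rw [hab, pv_nat_range_mul, List.map_flatMap]
  rw [List.flatMap_map]
  congr 1
  funext q
  rw [List.map_map, List.map_map]
  congr 1
  funext r
  simp only [Function.comp, Int.zero_add]
  have hq : (q : Int) * b + r = ((q * (b - 0).toNat + r : Nat) : Int) := by
    push_cast
    rw [Int.toNat_of_nonneg (by omega : (0:Int) ≤ b - 0)]
    ring
  rw [hq]

theorem pv_range_dec (ls : List (List String)) (h : ∀ l ∈ ls, l ≠ []) :
    (PySem.List.pyRange 0 (pvTot ls) 1).map (pvDec ls) = pvProduct ls := by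
  induction ls with
  | nil => decide
  | cons l ls ih =>
    have hT : 0 < pvTot ls := pvTot_pos ls (fun x hx => h x (by simp [hx]))
    have hl : 0 < (l.length : Int) := by
      have := List.length_pos_iff.mpr (h l (by simp)); omega
    have htot : pvTot (l :: ls) = (l.length : Int) * pvTot ls := rfl
    rw [htot, pv_pyRange_mul _ _ (by omega) (by omega), List.map_flatMap]
    have hstep : ∀ q ∈ PySem.List.pyRange 0 (l.length : Int) 1,
        ((PySem.List.pyRange 0 (pvTot ls) 1).map (fun r => q * pvTot ls + r)).map (pvDec (l :: ls))
          = (pvProduct ls).map (fun c => PySem.List.pyGetD l q "" :: c) := by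
      intro q hq
      rw [PySem.List.mem_pyRange_one] at hq
      rw [List.map_map]
      simp only [Function.comp_def]
      have hinner : ∀ r ∈ PySem.List.pyRange 0 (pvTot ls) 1,
          pvDec (l :: ls) (q * pvTot ls + r) = PySem.List.pyGetD l q "" :: pvDec ls r := by
        intro r hr
        rw [PySem.List.mem_pyRange_one] at hr
        simp only [pvDec]
        rw [List.cons.injEq]
        constructor
        · congr 1
          rw [PySem.Int.floordiv_eq_ediv_of_pos hT, PySem.Int.mod_eq_emod_of_pos hl]
          have : q * pvTot ls + r = r + q * pvTot ls := by ring
          rw [this, Int.add_mul_ediv_right _ _ (by omega : pvTot ls ≠ 0),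
            Int.ediv_eq_zero_of_lt hr.1 hr.2, Int.zero_add,
            Int.emod_eq_of_lt hq.1 hq.2]
        · have : q * pvTot ls + r = r + q * pvTot ls := by ring
          rw [this, pvDec_period ls (fun x hx => h x (by simp [hx]))]
      rw [List.map_congr_left hinner]
      have hmm : ((PySem.List.pyRange 0 (pvTot ls) 1).map (pvDec ls)).map
            (fun c => PySem.List.pyGetD l q "" :: c)
          = (PySem.List.pyRange 0 (pvTot ls) 1).map
            (fun a => PySem.List.pyGetD l q "" :: pvDec ls a) := by
        simp [List.map_map, Function.comp_def]
      rw [← hmm, ih (fun x hx => h x (by simp [hx]))]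
    rw [List.flatMap_congr hstep]
    show _ = pvProduct (l :: ls)
    simp only [pvProduct]
    have hself : l = (PySem.List.pyRange 0 (l.length : Int) 1).map
        (fun j => PySem.List.pyGetD l j "") := by
      rw [← PySem.List.len_eq, PySem.List.map_pyGetD_pyRange_zero]
    conv_rhs => rw [hself]
    rw [List.flatMap_map]

-- ---- inner loop ----

theorem pv_inner (ps : List (String × List String)) (i : Int) (base : List String) :
    (ps.zip (pvW ps)).foldl
        (fun var q =>
          PySem.List.pySetD var ((PySem.Int.ofStr? q.1.1).getD 0 - 1)
            (PySem.List.pyGetD q.1.2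
              (PySem.Int.mod (PySem.Int.floordiv i q.2) (q.1.2.length : Int)) "")) base
      = pvApply ((ps.map (·.1)).zip (pvDec (ps.map (·.2)) i)) base := by
  induction ps generalizing base with
  | nil => rfl
  | cons kv ps ih =>
    simp only [pvW, List.zip_cons_cons, List.foldl_cons, List.map_cons, pvDec]
    rw [ih]
    rfl

-- ---- assembly ----

theorem generate_variants_spec : Claim_equal_generate_variants := by
  intro mutation_dict seq _ _
  unfold Spec_generate_variants
  simp only [generate_variants, generate_variants_alt]
  set ps := (PySem.Dict.ofList mutation_dict).items with hps
  rw [pv_pairs_foldl, pv_wfold]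
  simp only [List.nil_append]
  rw [pvP_reverse]
  have htotal : 1 * pvTot (ps.reverse.map (·.2)) = pvTot (ps.map (·.2)) := by
    rw [List.map_reverse, pvTot_reverse]; ring
  rw [htotal]
  -- A side: map over the product
  rw [PySem.List.foldl_append_singleton_eq_map, List.nil_append]
  -- B side: map over the index range
  rw [PySem.List.foldl_append_singleton_eq_map, List.nil_append]
  by_cases hempty : ∀ l ∈ ps.map (·.2), l ≠ []
  · -- every mutation list nonempty
    rw [← pv_range_dec (ps.map (·.2)) hempty, List.map_map]
    apply List.map_congr_left
    intro i _
    simp only [Function.comp]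
    congr 1
    rw [pv_inner]
    -- A's inner loop at comb = pvDec … i
    have hc : (pvDec (ps.map (·.2)) i).length ≤ (ps.map (·.1)).length := by
      have : ∀ ls j, (pvDec ls j).length = ls.length := by
        intro ls j; induction ls with
        | nil => rfl
        | cons l ls ih => simp [pvDec, ih]
      simp [this]
    have h0 := pv_enum_apply (ps.map (·.1)) (pvDec (ps.map (·.2)) i) 0 seq (by simpa using hc)
    simp only [Nat.cast_zero, List.drop_zero] at h0
    rw [← h0]
  · -- some mutation list is empty: both sides are []
    push Not at hempty
    obtain ⟨l, hl, hlnil⟩ := hempty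
    subst hlnil
    rw [pvTot_zero_of_mem _ hl, pvProduct_nil_mem _ hl]
    rw [PySem.List.pyRange_zero]
    rfl
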